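-- pv_equiv track=rewrite | github.com/susan-meng/pipehome | at-framework/scripts/agent_a_maintenance.py | _infer_change_type
-- ===== SOURCE A (Python) =====
-- from typing import List, Dict, Any, Optional
--
-- def _infer_change_type(changed_files: List[Dict], actions: List[str]) -> str:
--     """推断变更类型（规则-based）"""
--
--     for file_info in changed_files:
--         path = file_info.get("path", "").lower()
--
--         # API 新增
--         if "controller" in path and "add" in actions:
--             return "api_addition"
--
--         # 参数校验变更
--         if any(keyword in path for keyword in ["validator", "validation", "constraint"]):
--             return "validation_change"
--
--         # 字段变更
--         if any(keyword in path for keyword in ["dto", "model", "entity", "vo"]):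
--             return "field_change"
--
--         # 性能相关
--         if any(keyword in path for keyword in ["performance", "cache", "async", "batch"]):
--             return "performance_change"
--
--     return "general_modification"
-- ===== SOURCE B (Python) =====
-- from typing import List, Dict
--
-- def _infer_change_type(changed_files: List[Dict], actions: List[str]) -> str:
--     """Column-wise: compute, per category, the first file index it hits, then
--     return the category with the smallest hit index (earlier candidate wins ties)."""
--     paths = [f.get("path", "").lower() for f in changed_files]
--     n = len(paths)
--
--     def first_hit(keywords):
--         return next((i for i, p in enumerate(paths) if any(k in p for k in keywords)), n)
--
--     candidates = []
--     if "add" in actions: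
--         candidates.append((first_hit(["controller"]), "api_addition"))
--     candidates.append((first_hit(["validator", "validation", "constraint"]), "validation_change"))
--     candidates.append((first_hit(["dto", "model", "entity", "vo"]), "field_change"))
--     candidates.append((first_hit(["performance", "cache", "async", "batch"]), "performance_change"))
--
--     best, label = n, "general_modification"
--     for idx, lab in candidates:
--         if idx < best:
--             best, label = idx, lab
--     return label
-- ===== Notes on version B (the rewrite author's own statement) =====
-- stated objective: alternative
-- what changed: Inverts the loop nesting: instead of scanning files and testing each rule per file, B scans column-wise, computing for each category the first file index it matches and then returning the category with the smallest index (candidate order breaks ties).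
import Mathlib
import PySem

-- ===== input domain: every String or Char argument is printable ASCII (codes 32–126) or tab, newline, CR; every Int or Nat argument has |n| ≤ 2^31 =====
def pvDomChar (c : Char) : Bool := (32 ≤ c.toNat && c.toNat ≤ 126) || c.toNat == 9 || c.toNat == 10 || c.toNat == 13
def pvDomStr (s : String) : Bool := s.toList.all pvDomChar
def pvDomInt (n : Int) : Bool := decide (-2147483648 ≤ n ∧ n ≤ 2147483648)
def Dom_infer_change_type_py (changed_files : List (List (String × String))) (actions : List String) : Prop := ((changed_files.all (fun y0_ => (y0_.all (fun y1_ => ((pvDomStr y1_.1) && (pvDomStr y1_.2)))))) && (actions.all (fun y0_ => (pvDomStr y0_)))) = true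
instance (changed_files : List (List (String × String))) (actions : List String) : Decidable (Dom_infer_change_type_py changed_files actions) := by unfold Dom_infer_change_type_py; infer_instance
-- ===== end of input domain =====

-- B inverts the loop nesting: per-category column scans (first file index hit by each
-- category) followed by an argmin over the candidates, instead of A's per-file rule chain.


-- ===== PORT A =====
def infer_change_type_py (changed_files : List (List (String × String))) (actions : List String) : String :=
  match changed_files with
  | [] => "general_modification"
  | file_info :: rest =>
    let path := PySem.Str.lower ((PySem.Dict.mk file_info).getD "path" "")
    if PySem.Str.isIn "controller" path && actions.contains "add" then "api_addition"
    else if ["validator", "validation", "constraint"].any (fun k => PySem.Str.isIn k path) then "validation_change"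
    else if ["dto", "model", "entity", "vo"].any (fun k => PySem.Str.isIn k path) then "field_change"
    else if ["performance", "cache", "async", "batch"].any (fun k => PySem.Str.isIn k path) then "performance_change"
    else infer_change_type_py rest actions

-- ===== PORT B =====
-- hand port of next((i for i, p in enumerate(paths) if any(k in p for k in keywords)), n):
-- index of the first path containing one of the keywords, paths.length if none (exact)
def pvFirstHit (keywords : List String) (paths : List String) : Nat :=
  match paths with
  | [] => 0
  | p :: rest =>
    if keywords.any (fun k => PySem.Str.isIn k p) then 0 else pvFirstHit keywords rest + 1

-- the running (best, label) update of B's final loop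
def pvBestStep (b : Nat × String) (c : Nat × String) : Nat × String :=
  if c.1 < b.1 then c else b

def infer_change_type_py_alt (changed_files : List (List (String × String))) (actions : List String) : String :=
  let paths := changed_files.map (fun f => PySem.Str.lower ((PySem.Dict.mk f).getD "path" ""))
  let n := paths.length
  let base : List (Nat × String) :=
    [(pvFirstHit ["validator", "validation", "constraint"] paths, "validation_change"),
     (pvFirstHit ["dto", "model", "entity", "vo"] paths, "field_change"),
     (pvFirstHit ["performance", "cache", "async", "batch"] paths, "performance_change")]
  let candidates :=
    if actions.contains "add" then (pvFirstHit ["controller"] paths, "api_addition") :: base else base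
  (candidates.foldl pvBestStep (n, "general_modification")).2

-- ===== PRECONDITION & SPEC =====
def Spec_infer_change_type_py (changed_files : List (List (String × String))) (actions : List String) (out : String) : Prop := out = infer_change_type_py_alt changed_files actions
instance (changed_files : List (List (String × String))) (actions : List String) (out : String) : Decidable (Spec_infer_change_type_py changed_files actions out) := by unfold Spec_infer_change_type_py; infer_instance

-- ===== CLAIM (what is proved, stated in full; the proofs are below) =====
def Claim_equal_infer_change_type_py : Prop := ∀ (changed_files : List (List (String × String))) (actions : List String), Dom_infer_change_type_py changed_files actions → Spec_infer_change_type_py changed_files actions (infer_change_type_py changed_files actions)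

-- ===== LEMMAS AND PROOFS =====

-- A's per-file rule chain, abstracted over the lowered paths and the precomputed "add" flag
def pvACore (add : Bool) (paths : List String) : String :=
  match paths with
  | [] => "general_modification"
  | p :: rest =>
    if PySem.Str.isIn "controller" p && add then "api_addition"
    else if ["validator", "validation", "constraint"].any (fun k => PySem.Str.isIn k p) then "validation_change"
    else if ["dto", "model", "entity", "vo"].any (fun k => PySem.Str.isIn k p) then "field_change"
    else if ["performance", "cache", "async", "batch"].any (fun k => PySem.Str.isIn k p) then "performance_change"
    else pvACore add rest

-- B's candidate/argmin computation, abstracted the same way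
def pvBExpr (add : Bool) (paths : List String) : String :=
  (((if add then [(pvFirstHit ["controller"] paths, "api_addition")] else []) ++
    [(pvFirstHit ["validator", "validation", "constraint"] paths, "validation_change"),
     (pvFirstHit ["dto", "model", "entity", "vo"] paths, "field_change"),
     (pvFirstHit ["performance", "cache", "async", "batch"] paths, "performance_change")]).foldl
      pvBestStep (paths.length, "general_modification")).2

theorem a_eq_core (changed_files : List (List (String × String))) (actions : List String) :
    infer_change_type_py changed_files actions =
      pvACore (actions.contains "add")
        (changed_files.map (fun f => PySem.Str.lower ((PySem.Dict.mk f).getD "path" ""))) := by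
  induction changed_files with
  | nil => rfl
  | cons f rest ih => simp only [infer_change_type_py, pvACore, List.map, ih]

theorem b_eq_expr (changed_files : List (List (String × String))) (actions : List String) :
    infer_change_type_py_alt changed_files actions =
      pvBExpr (actions.contains "add")
        (changed_files.map (fun f => PySem.Str.lower ((PySem.Dict.mk f).getD "path" ""))) := by
  cases h : actions.contains "add" <;>
    simp only [infer_change_type_py_alt, pvBExpr, h, Bool.false_eq_true, reduceIte,
      List.singleton_append, List.nil_append]

-- shifting every candidate index (and the initial best) by one commutes with the fold
theorem pvFold_shift (l : List (Nat × String)) (init : Nat × String) :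
    (l.map (fun c => (c.1 + 1, c.2))).foldl pvBestStep (init.1 + 1, init.2) =
      ((l.foldl pvBestStep init).1 + 1, (l.foldl pvBestStep init).2) := by
  induction l generalizing init with
  | nil => rfl
  | cons c cs ih =>
    simp only [List.map, List.foldl, pvBestStep]
    by_cases h : c.1 < init.1
    · simp [h, Nat.add_lt_add_iff_right.mpr h, ih]
    · have h' : ¬ c.1 + 1 < init.1 + 1 := by omega
      simp [h, h', ih]

set_option maxHeartbeats 2000000 in
theorem core_eq (add : Bool) (paths : List String) : pvACore add paths = pvBExpr add paths := by
  induction paths with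
  | nil => cases add <;> rfl
  | cons p rest ih =>
    cases hc : PySem.Str.isIn "controller" p <;>
    cases hv : (["validator", "validation", "constraint"].any (fun k => PySem.Str.isIn k p)) <;>
    cases hf : (["dto", "model", "entity", "vo"].any (fun k => PySem.Str.isIn k p)) <;>
    cases hperf : (["performance", "cache", "async", "batch"].any (fun k => PySem.Str.isIn k p)) <;>
    cases add <;>
      simp only [pvACore, pvBExpr, pvFirstHit, List.any_cons, List.any_nil, Bool.or_false, hc, hv,
        hf, hperf, Bool.true_and, Bool.false_and, Bool.and_true, Bool.and_false,
        Bool.false_eq_true, reduceIte, List.length_cons, List.singleton_append, List.nil_append] <;>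
      first
        | (-- no keyword hits the head path: every candidate index and n shift by one
           rw [ih]
           simp only [pvBExpr, List.singleton_append, List.nil_append, Bool.false_eq_true,
             reduceIte]
           first
             | (have h := pvFold_shift
                  [(pvFirstHit ["controller"] rest, "api_addition"),
                   (pvFirstHit ["validator", "validation", "constraint"] rest, "validation_change"),
                   (pvFirstHit ["dto", "model", "entity", "vo"] rest, "field_change"),
                   (pvFirstHit ["performance", "cache", "async", "batch"] rest, "performance_change")]
                  (rest.length, "general_modification")
                simp only [List.map] at h
                rw [h])
             | (have h := pvFold_shift
                  [(pvFirstHit ["validator", "validation", "constraint"] rest, "validation_change"),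
                   (pvFirstHit ["dto", "model", "entity", "vo"] rest, "field_change"),
                   (pvFirstHit ["performance", "cache", "async", "batch"] rest, "performance_change")]
                  (rest.length, "general_modification")
                simp only [List.map] at h
                rw [h]))
        | (simp [List.foldl, pvBestStep] <;> split_ifs <;> first | rfl | omega)

-- ===== VERDICT (by name: the statement is the Claim_ definition above) =====
theorem infer_change_type_py_spec : Claim_equal_infer_change_type_py := by
  intro changed_files actions _
  rw [Spec_infer_change_type_py, a_eq_core, b_eq_expr, core_eq]
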